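-- pv_equiv track=rewrite | github.com/trinhtn4322/code | code/image_processor.py | group_centers
-- ===== SOURCE A (Python) =====
-- def group_centers(centers, axis=0, threshold=50):
--     """
--     Nhóm các trung tâm dựa trên khoảng cách theo trục được chỉ định.
--
--     Args:
--         centers (list of tuples): Danh sách các trung tâm (x, y).
--         axis (int): 0 cho trục x (dọc), 1 cho trục y (ngang).
--         threshold (int): Ngưỡng khoảng cách để nhóm.
--
--     Returns:
--         list of lists: Danh sách các nhóm, mỗi nhóm là danh sách các chỉ số trong centers.
--     """
--     groups = []
--     centers_sorted = sorted(enumerate(centers), key=lambda c: c[1][axis])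
--     group = []
--     prev_value = None
--     for idx, center in centers_sorted:
--         value = center[axis]
--         if prev_value is None or abs(value - prev_value) <= threshold:
--             group.append(idx)
--         else:
--             groups.append(group)
--             group = [idx]
--         prev_value = value
--     if group:
--         groups.append(group)
--     return groups
-- ===== SOURCE B (Python) =====
-- def group_centers(centers, axis=0, threshold=50):
--     # Two-pointer run extraction: repeatedly peel the maximal chained run off
--     # the front of the sorted list and emit it as one whole group.
--     pending = sorted(enumerate(centers), key=lambda c: c[1][axis])
--     groups = []
--     while pending:
--         run = [pending[0]]
--         pending = pending[1:]
--         while pending and abs(pending[0][1][axis] - run[-1][1][axis]) <= threshold: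
--             run.append(pending[0])
--             pending = pending[1:]
--         groups.append([idx for idx, _ in run])
--     return groups
-- ===== Notes on version B (the rewrite author's own statement) =====
-- stated objective: alternative
-- what changed: A is one flat stateful pass (groups/group/prev_value accumulator with a trailing flush); B is a two-pointer run extraction: an outer loop repeatedly peels the maximal chained run off the front of the sorted list with an inner loop and emits each run as one whole group, with no prev_value state and no post-loop flush.
import Mathlib
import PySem

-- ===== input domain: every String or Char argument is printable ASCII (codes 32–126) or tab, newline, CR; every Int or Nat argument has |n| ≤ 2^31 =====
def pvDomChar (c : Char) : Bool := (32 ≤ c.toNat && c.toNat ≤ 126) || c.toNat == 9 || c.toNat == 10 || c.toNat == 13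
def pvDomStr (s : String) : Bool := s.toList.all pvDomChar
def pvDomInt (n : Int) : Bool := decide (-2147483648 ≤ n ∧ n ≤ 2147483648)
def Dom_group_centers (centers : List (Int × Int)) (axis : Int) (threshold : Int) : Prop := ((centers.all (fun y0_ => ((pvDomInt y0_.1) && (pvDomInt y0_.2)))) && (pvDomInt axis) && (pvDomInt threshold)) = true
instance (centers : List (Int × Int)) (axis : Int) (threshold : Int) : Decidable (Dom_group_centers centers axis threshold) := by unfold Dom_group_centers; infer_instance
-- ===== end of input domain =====

-- B replaces A's flat stateful accumulate-and-flush pass by a nested two-pointer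
-- run extraction over the sorted list (objective: alternative, same cost).

-- ===== PORT A =====
-- Python tuple indexing c[axis] on a pair: exact for axis ∈ {-2,-1,0,1}; any other
-- axis raises IndexError in Python and is excluded by Pre_group_centers.
def pvTupGet (c : Int × Int) (axis : Int) : Int :=
  if axis = 0 ∨ axis = -2 then c.1 else c.2

-- the loop body of A: state = (groups, group, prev_value)
def pvStepA (axis threshold : Int) (s : List (List Int) × List Int × Option Int)
    (ic : Int × (Int × Int)) : List (List Int) × List Int × Option Int :=
  let value := pvTupGet ic.2 axis
  match s.2.2 with
  | none => (s.1, s.2.1 ++ [ic.1], some value)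
  | some p =>
      if |value - p| ≤ threshold then (s.1, s.2.1 ++ [ic.1], some value)
      else (s.1 ++ [s.2.1], [ic.1], some value)

-- the post-loop flush of A: if group: groups.append(group)
def pvFin (st : List (List Int) × List Int × Option Int) : List (List Int) :=
  if st.2.1 ≠ [] then st.1 ++ [st.2.1] else st.1

def group_centers (centers : List (Int × Int)) (axis : Int) (threshold : Int) : List (List Int) :=
  let centers_sorted := PySem.List.sorted (PySem.List.enumerate centers) (key := fun c => pvTupGet c.2 axis)
  pvFin (centers_sorted.foldl (pvStepA axis threshold) ([], [], none))

-- ===== PORT B =====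
-- inner while of B: extend the current run while the next pending element chains
-- to run[-1] within threshold; returns (run, remaining pending).
-- (run is never empty, so the getLastD default is unreachable.)
def pvInner (axis threshold : Int) (run : List (Int × (Int × Int))) :
    List (Int × (Int × Int)) → List (Int × (Int × Int)) × List (Int × (Int × Int))
  | [] => (run, [])
  | ic :: t =>
      if |pvTupGet ic.2 axis - pvTupGet (run.getLastD (0, (0, 0))).2 axis| ≤ threshold then
        pvInner axis threshold (run ++ [ic]) t
      else (run, ic :: t)

-- the pending list only shrinks across the inner while (outer-loop termination)
theorem pvInner_snd_length (axis threshold : Int) :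
    ∀ (t run : List (Int × (Int × Int))), (pvInner axis threshold run t).2.length ≤ t.length := by
  intro t
  induction t with
  | nil => intro run; simp [pvInner]
  | cons ic t ih =>
      intro run
      simp only [pvInner]
      split_ifs
      · exact le_trans (ih _) (Nat.le_succ _)
      · simp

-- outer while of B: peel off one maximal run per iteration
def pvOuterB (axis threshold : Int) (pending : List (Int × (Int × Int))) : List (List Int) :=
  match pending with
  | [] => []
  | ic :: t =>
      let r := pvInner axis threshold [ic] t
      (r.1.map (fun p => p.1)) :: pvOuterB axis threshold r.2
termination_by pending.length
decreasing_by exact Nat.lt_succ_of_le (pvInner_snd_length axis threshold t [ic])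

def group_centers_alt (centers : List (Int × Int)) (axis : Int) (threshold : Int) : List (List Int) :=
  pvOuterB axis threshold (PySem.List.sorted (PySem.List.enumerate centers) (key := fun c => pvTupGet c.2 axis))

-- ===== PRECONDITION & SPEC =====
-- Exactly the inputs on which Python A returns: on nonempty centers the sort key
-- indexes each pair, so axis must be a valid Python index of a 2-tuple
-- ({-2,-1,0,1}); otherwise A raises IndexError.  (Empty centers never index.)
def Pre_group_centers (centers : List (Int × Int)) (axis : Int) (threshold : Int) : Prop :=
  centers = [] ∨ axis = 0 ∨ axis = 1 ∨ axis = -1 ∨ axis = -2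
instance (centers : List (Int × Int)) (axis : Int) (threshold : Int) : Decidable (Pre_group_centers centers axis threshold) := by unfold Pre_group_centers; infer_instance

def pvWitness_group_centers : (List (Int × Int)) × Int × Int := ([(0, 3), (120, 7), (130, 9)], 0, 50)

def Spec_group_centers (centers : List (Int × Int)) (axis : Int) (threshold : Int) (out : List (List Int)) : Prop := out = group_centers_alt centers axis threshold
instance (centers : List (Int × Int)) (axis : Int) (threshold : Int) (out : List (List Int)) : Decidable (Spec_group_centers centers axis threshold out) := by unfold Spec_group_centers; infer_instance

-- ===== CLAIM (what is proved, stated in full; the proofs are below) =====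
def Claim_equal_group_centers : Prop := ∀ (centers : List (Int × Int)) (axis : Int) (threshold : Int), Dom_group_centers centers axis threshold → Pre_group_centers centers axis threshold → Spec_group_centers centers axis threshold (group_centers centers axis threshold)

-- ===== LEMMAS AND PROOFS =====

-- The grouping skeleton A's loop reduces to: continue with current group g
-- whose last element has axis value p, chaining through the rest of the sorted list.
def pvCont (axis threshold p : Int) (g : List Int) : List (Int × (Int × Int)) → List (List Int)
  | [] => [g]
  | ic :: t =>
      if |pvTupGet ic.2 axis - p| ≤ threshold then pvCont axis threshold (pvTupGet ic.2 axis) (g ++ [ic.1]) t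
      else g :: pvCont axis threshold (pvTupGet ic.2 axis) [ic.1] t

theorem pvA_fold (axis threshold : Int) :
    ∀ (t : List (Int × (Int × Int))) (gs : List (List Int)) (g : List Int) (p : Int), g ≠ [] →
      pvFin (t.foldl (pvStepA axis threshold) (gs, g, some p)) = gs ++ pvCont axis threshold p g t := by
  intro t
  induction t with
  | nil => intro gs g p hg; simp [pvFin, pvCont, hg]
  | cons ic t ih =>
      intro gs g p hg
      simp only [List.foldl_cons, pvStepA, pvCont]
      split_ifs with h
      · rw [ih gs (g ++ [ic.1]) _ (by simp)]
      · rw [ih (gs ++ [g]) [ic.1] _ (by simp)]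
        simp

-- B's nested loops compute the same skeleton: with a nonempty run whose last
-- element has axis value p, the inner+outer pair produces pvCont.
theorem pvB_run (axis threshold : Int) :
    ∀ (t g : List (Int × (Int × Int))), g ≠ [] →
      pvCont axis threshold (pvTupGet (g.getLastD (0, (0, 0))).2 axis) (g.map (fun q => q.1)) t
        = (pvInner axis threshold g t).1.map (fun q => q.1)
            :: pvOuterB axis threshold (pvInner axis threshold g t).2 := by
  intro t
  induction t with
  | nil => intro g hg; simp [pvCont, pvInner, pvOuterB]
  | cons ic t ih =>
      intro g hg
      simp only [pvCont, pvInner]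
      split_ifs with h
      · have := ih (g ++ [ic]) (by simp)
        rw [List.getLastD_concat] at this
        simpa using this
      · have := ih [ic] (by simp)
        simp only [List.getLastD, List.map_cons, List.map_nil] at this
        rw [pvOuterB]
        simp [← this]

-- ===== VERDICT (by name: the statement is the Claim_ definition above) =====
theorem group_centers_spec : Claim_equal_group_centers := by
  intro centers axis threshold _ _
  -- the two Lean ports agree on every input (pvTupGet is total);
  -- Pre_ only delimits where the Python original returns rather than raises
  unfold Spec_group_centers group_centers group_centers_alt
  cases hord : PySem.List.sorted (PySem.List.enumerate centers) (key := fun c => pvTupGet c.2 axis) with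
  | nil => simp [pvFin, pvOuterB]
  | cons ic t =>
      simp only [List.foldl_cons, pvStepA]
      rw [show ([] ++ [ic.1] : List Int) = [ic.1] from rfl,
        pvA_fold axis threshold t [] [ic.1] _ (by simp), List.nil_append]
      rw [pvOuterB]
      have := pvB_run axis threshold t [ic] (by simp)
      simpa using this
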